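-- pv_equiv track=rewrite | github.com/gA4ss/mympz | src/research/mul_toom_cook.py | generate_w_poly
-- ===== SOURCE A (Python) =====
-- def generate_decline_w_poly(w, k=0, first=True):
--     w_poly = []
--     if first:
--         col = w
--     else:
--         col = [w[i]//k for i in range(0, len(w))]
--     w_poly.append(col[0])
--
--     if (len(w) > 1):
--         next_col = [col[i+1]-col[i] for i in range(0, len(col)-1)]
--         w_poly.extend(generate_decline_w_poly(next_col, k+1, False))
--
--     if first:
--         w_poly = w_poly[::-1]
--     return w_poly
--
-- def generate_w_poly(w):
--     def __eval_c(x, y_list, k):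
--         res = []
--         y = y_list[k]
--
--         res.append(x)
--         if k == 1:
--           res.append(x-k*y)
--           return res
--
--         res.extend(__eval_c(x-k*y, y_list, k-1))
--         return res
--
--     w_poly = []
--     dec_w_poly = generate_decline_w_poly(w)
--     w_poly.append(dec_w_poly[0])
--
--     m = len(dec_w_poly)
--     k = m-2
--     y_list = [dec_w_poly[0]] * (m-1)
--     for i in range(1, m-1):
--         y_list = __eval_c(dec_w_poly[i], y_list, k)
--         w_poly.append(y_list[-1])
--         y_list = y_list[::-1]
--         k -= 1
--
--     w_poly.append(dec_w_poly[-1])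
--     return w_poly
-- ===== SOURCE B (Python) =====
-- def generate_w_poly(w):
--     # Build the divided finite-difference heads iteratively (no recursion),
--     # then convert with an explicit inner loop keeping the y-values in
--     # ascending order (no per-iteration list reversal).
--     col = list(w)
--     heads = [col[0]]
--     k = 1
--     while len(col) > 1:
--         col = [(col[i + 1] - col[i]) // k for i in range(len(col) - 1)]
--         heads.append(col[0])
--         k += 1
--     dec = heads[::-1]
--
--     m = len(dec)
--     w_poly = [dec[0]]
--     ys = [dec[0]] * (m - 1)
--     for i in range(1, m - 1):
--         kk = m - 1 - i
--         x = dec[i]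
--         new = [x]
--         for j in range(kk, 0, -1):
--             x = x - j * ys[j]
--             new = [x] + new
--         ys = new
--         w_poly.append(x)
--     w_poly.append(dec[-1])
--     return w_poly
-- ===== Notes on version B (the rewrite author's own statement) =====
-- stated objective: alternative
-- what changed: B replaces A's recursive decline-table builder and the recursive __eval_c plus per-iteration list reversal with two explicit iterative loops: the difference table is built by a while loop collecting heads, and each interpolation step runs a plain descending index loop that keeps the y-values in ascending order, so no list is ever reversed inside the loop.
import Mathlib
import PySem

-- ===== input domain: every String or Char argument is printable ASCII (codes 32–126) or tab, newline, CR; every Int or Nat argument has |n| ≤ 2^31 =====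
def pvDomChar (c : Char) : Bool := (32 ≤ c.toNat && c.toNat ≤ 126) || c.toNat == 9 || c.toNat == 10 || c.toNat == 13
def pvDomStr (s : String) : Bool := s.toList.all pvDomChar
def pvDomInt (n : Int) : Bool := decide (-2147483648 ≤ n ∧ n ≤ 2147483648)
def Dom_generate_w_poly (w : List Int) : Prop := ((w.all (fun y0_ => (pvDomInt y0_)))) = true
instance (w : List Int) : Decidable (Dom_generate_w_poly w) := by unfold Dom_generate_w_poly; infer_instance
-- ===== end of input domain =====

-- B builds the divided finite-difference table with an iterative loop and converts
-- with an explicit descending index loop (y-values kept ascending, no per-step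
-- reversal) instead of A's two recursions; return value only, no argument mutation.


-- ===== PORT A =====
-- generate_decline_w_poly(w, k, first); the comprehensions '[w[i]//k for i in range(len(w))]'
-- and '[col[i+1]-col[i] for i in range(len(col)-1)]' are ported as the value-identical
-- map / zipWith over the same traversal; col[0] is pyGetD col 0 0 (Pre_ excludes w = [],
-- the only input reaching an empty col).
def pvDecline (w : List Int) (k : Int) (first : Bool) : List Int :=
  let col := if first then w else w.map (fun x => PySem.Int.floordiv x k)
  let wp := [PySem.List.pyGetD col 0 0]
  let wp := if 1 < w.length then
      wp ++ pvDecline (List.zipWith (fun a b => b - a) col col.tail) (k + 1) false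
    else wp
  if first then wp.reverse else wp
termination_by w.length
decreasing_by
  simp only [List.length_zipWith, List.length_tail]
  split <;> simp <;> omega

-- __eval_c(x, y_list, k); Python never calls it with k ≤ 0 (the loop gives k ≥ 1),
-- the k ≤ 0 branch is only for Lean totality.
def pvEvalC (x : Int) (ys : List Int) (k : Int) : List Int :=
  if k == 1 then [x, x - k * PySem.List.pyGetD ys k 0]
  else if 1 < k then
    x :: pvEvalC (x - k * PySem.List.pyGetD ys k 0) ys (k - 1)
  else [x]
termination_by k.toNat
decreasing_by omega

def generate_w_poly (w : List Int) : List Int :=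
  let dec := pvDecline w 0 true
  let m : Int := dec.length
  let st := (PySem.List.pyRange 1 (m - 1) 1).foldl
    (fun (st : List Int × Int × List Int) i =>
      let ys2 := pvEvalC (PySem.List.pyGetD dec i 0) st.1 st.2.1
      (ys2.reverse, st.2.1 - 1, st.2.2 ++ [PySem.List.pyGetD ys2 (-1) 0]))
    (List.replicate (dec.length - 1) (PySem.List.pyGetD dec 0 0), m - 2,
     [PySem.List.pyGetD dec 0 0])
  st.2.2 ++ [PySem.List.pyGetD dec (-1) 0]

-- ===== PORT B =====
-- the while-loop building the heads of the divided difference table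
def pvDecLoop (col : List Int) (k : Int) (heads : List Int) : List Int :=
  if 1 < col.length then
    let col' := List.zipWith (fun a b => PySem.Int.floordiv (b - a) k) col col.tail
    pvDecLoop col' (k + 1) (heads ++ [PySem.List.pyGetD col' 0 0])
  else heads
termination_by col.length
decreasing_by
  simp only [List.length_zipWith, List.length_tail]
  omega

def generate_w_poly_alt (w : List Int) : List Int :=
  let dec := (pvDecLoop w 1 [PySem.List.pyGetD w 0 0]).reverse
  let m : Int := dec.length
  let st := (PySem.List.pyRange 1 (m - 1) 1).foldl
    (fun (st : List Int × List Int) i =>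
      let kk := m - 1 - i
      let x0 := PySem.List.pyGetD dec i 0
      let r := (PySem.List.pyRange kk 0 (-1)).foldl
        (fun (p : Int × List Int) j =>
          let x := p.1 - j * PySem.List.pyGetD st.1 j 0
          (x, [x] ++ p.2))
        (x0, [x0])
      (r.2, st.2 ++ [r.1]))
    (List.replicate (dec.length - 1) (PySem.List.pyGetD dec 0 0),
     [PySem.List.pyGetD dec 0 0])
  st.2 ++ [PySem.List.pyGetD dec (-1) 0]

-- ===== PRECONDITION & SPEC =====
-- Pre_ excludes exactly w = [], on which the Python A raises IndexError (dec_w_poly[0]).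
def Pre_generate_w_poly (w : List Int) : Prop := w ≠ []
instance (w : List Int) : Decidable (Pre_generate_w_poly w) := by
  unfold Pre_generate_w_poly; infer_instance
def pvWitness_generate_w_poly : List Int := ([0, 1, 8, 27])

def Spec_generate_w_poly (w : List Int) (out : List Int) : Prop := out = generate_w_poly_alt w
instance (w : List Int) (out : List Int) : Decidable (Spec_generate_w_poly w out) := by
  unfold Spec_generate_w_poly; infer_instance

-- ===== CLAIM (what is proved, stated in full; the proofs are below) =====
def Claim_equal_generate_w_poly : Prop :=
  ∀ (w : List Int), Dom_generate_w_poly w → Pre_generate_w_poly w →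
    Spec_generate_w_poly w (generate_w_poly w)

-- ===== LEMMAS AND PROOFS =====

-- the tail of A's decline table below the first head
def pvTailOf (col : List Int) (k : Int) : List Int :=
  if 1 < col.length then pvDecline (List.zipWith (fun a b => b - a) col col.tail) k false
  else []

lemma pvDecLoop_eq (col : List Int) (k : Int) (heads : List Int) :
    pvDecLoop col k heads = heads ++ pvTailOf col k := by
  induction col, k, heads using pvDecLoop.induct with
  | case1 col k heads h col2 ih =>
    rw [pvDecLoop, if_pos h, ih]
    conv_rhs => rw [pvTailOf, if_pos h, pvDecline]
    have hmap : (List.zipWith (fun a b => b - a) col col.tail).map (fun x => PySem.Int.floordiv x k)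
        = col2 := by
      rw [List.map_zipWith]
    have hlen : (List.zipWith (fun a b : Int => b - a) col col.tail).length = col2.length := by
      simp [col2]
    simp only [Bool.false_eq_true, if_false, hmap, hlen, List.append_assoc]
    rw [pvTailOf]
    split <;> simp
  | case2 col k heads h =>
    rw [pvDecLoop, if_neg h, pvTailOf, if_neg h, List.append_nil]

lemma dec_eq (w : List Int) :
    (pvDecLoop w 1 [PySem.List.pyGetD w 0 0]).reverse = pvDecline w 0 true := by
  rw [pvDecLoop_eq]
  conv_rhs => rw [pvDecline]
  simp only [pvTailOf]
  split <;> simp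

lemma pvEvalC_ne_nil (x : Int) (ys : List Int) (k : Int) : pvEvalC x ys k ≠ [] := by
  rw [pvEvalC]; split_ifs <;> simp

-- inner loop of B = reversal of A's __eval_c, plus the last element as the fold's fst
lemma pyGetD_neg_one_cons (a : Int) (xs : List Int) (h : xs ≠ []) :
    PySem.List.pyGetD (a :: xs) (-1) 0 = PySem.List.pyGetD xs (-1) 0 := by
  rw [PySem.List.pyGetD_neg_one (xs := a :: xs) (h := by simp),
    PySem.List.pyGetD_neg_one (h := h), List.getLast_cons h]

lemma pyGetD_pair (a b : Int) : PySem.List.pyGetD [a, b] (-1) 0 = b := by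
  rw [PySem.List.pyGetD_neg_one (xs := [a,b]) (h := by simp)]; simp

lemma pvEvalC_one (x : Int) (ys : List Int) :
    pvEvalC x ys ((1:Nat):Int) = [x, x - PySem.List.pyGetD ys 1 0] := by
  rw [pvEvalC]; norm_num

lemma pvEvalC_step (x : Int) (ys : List Int) (n : Nat) (hn : 1 ≤ n) :
    pvEvalC x ys ((n+1:Nat):Int)
      = x :: pvEvalC (x - ((n+1:Nat):Int) * PySem.List.pyGetD ys ((n+1:Nat):Int) 0) ys ((n:Nat):Int) := by
  rw [pvEvalC]
  rw [if_neg (by simp; omega), if_pos (by push_cast; omega)]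
  rw [show (((n+1 : Nat)) : Int) - 1 = ((n:Nat) : Int) by push_cast; ring]

lemma inner_eq (ys : List Int) : ∀ (n : Nat), 1 ≤ n → ∀ (x : Int) (suf : List Int),
    (PySem.List.pyRange (n : Int) 0 (-1)).foldl
      (fun (p : Int × List Int) j =>
        let x := p.1 - j * PySem.List.pyGetD ys j 0
        (x, [x] ++ p.2))
      (x, x :: suf)
    = (PySem.List.pyGetD (pvEvalC x ys (n : Int)) (-1) 0,
       (pvEvalC x ys (n : Int)).reverse ++ suf) := by
  intro n
  induction n with
  | zero => omega
  | succ n ih =>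
    intro _ x suf
    by_cases h1 : n = 0
    · subst h1
      rw [PySem.List.pyRange_neg_one_cons (by norm_num),
        PySem.List.pyRange_neg_one_eq_nil (by omega)]
      rw [show ((0+1:Nat):Int) = ((1:Nat):Int) by norm_num, pvEvalC_one, pyGetD_pair]
      norm_num
    · have hn : 1 ≤ n := by omega
      rw [pvEvalC_step x ys n hn]
      rw [PySem.List.pyRange_neg_one_cons (by positivity)]
      simp only [List.foldl_cons]
      rw [show (((n+1 : Nat)) : Int) - 1 = ((n:Nat) : Int) by push_cast; ring]
      have := ih hn (x - ((n+1:Nat):Int) * PySem.List.pyGetD ys ((n+1:Nat):Int) 0) (x :: suf)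
      simp only [List.singleton_append] at this ⊢
      rw [this]
      rw [pyGetD_neg_one_cons _ _ (pvEvalC_ne_nil _ _ _)]
      simp

lemma outer_eq (dec : List Int) : ∀ (t : Nat) (a : Int) (ys wp : List Int), 1 ≤ a →
    (((dec.length : Int) - 1 - a)).toNat = t →
    (((PySem.List.pyRange a ((dec.length : Int) - 1) 1).foldl
      (fun (st : List Int × Int × List Int) i =>
        let ys2 := pvEvalC (PySem.List.pyGetD dec i 0) st.1 st.2.1
        (ys2.reverse, st.2.1 - 1, st.2.2 ++ [PySem.List.pyGetD ys2 (-1) 0]))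
      (ys, (dec.length : Int) - 1 - a, wp)).1
     = ((PySem.List.pyRange a ((dec.length : Int) - 1) 1).foldl
      (fun (st : List Int × List Int) i =>
        let kk := (dec.length : Int) - 1 - i
        let x0 := PySem.List.pyGetD dec i 0
        let r := (PySem.List.pyRange kk 0 (-1)).foldl
          (fun (p : Int × List Int) j =>
            let x := p.1 - j * PySem.List.pyGetD st.1 j 0
            (x, [x] ++ p.2))
          (x0, [x0])
        (r.2, st.2 ++ [r.1]))
      (ys, wp)).1)
    ∧ (((PySem.List.pyRange a ((dec.length : Int) - 1) 1).foldl
      (fun (st : List Int × Int × List Int) i =>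
        let ys2 := pvEvalC (PySem.List.pyGetD dec i 0) st.1 st.2.1
        (ys2.reverse, st.2.1 - 1, st.2.2 ++ [PySem.List.pyGetD ys2 (-1) 0]))
      (ys, (dec.length : Int) - 1 - a, wp)).2.2
     = ((PySem.List.pyRange a ((dec.length : Int) - 1) 1).foldl
      (fun (st : List Int × List Int) i =>
        let kk := (dec.length : Int) - 1 - i
        let x0 := PySem.List.pyGetD dec i 0
        let r := (PySem.List.pyRange kk 0 (-1)).foldl
          (fun (p : Int × List Int) j =>
            let x := p.1 - j * PySem.List.pyGetD st.1 j 0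
            (x, [x] ++ p.2))
          (x0, [x0])
        (r.2, st.2 ++ [r.1]))
      (ys, wp)).2) := by
  intro t
  induction t with
  | zero =>
    intro a ys wp ha ht
    rw [PySem.List.pyRange_one_eq_nil (by omega)]
    simp
  | succ t ih =>
    intro a ys wp ha ht
    rw [PySem.List.pyRange_one_cons (by omega)]
    simp only [List.foldl_cons]
    have hk1 : (1:Int) ≤ (dec.length:Int) - 1 - a := by omega
    have hkn : ((((dec.length:Int) - 1 - a).toNat : Nat) : Int) = (dec.length:Int) - 1 - a := by
      omega
    have hinner := inner_eq ys (((dec.length:Int) - 1 - a).toNat) (by omega)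
      (PySem.List.pyGetD dec a 0) []
    rw [hkn] at hinner
    simp only [List.append_nil] at hinner
    simp only [hinner]
    rw [show (dec.length:Int) - 1 - a - 1 = (dec.length:Int) - 1 - (a + 1) by ring]
    exact ih (a + 1) _ _ (by omega) (by omega)


-- ===== VERDICT (by name: the statement is the Claim_ definition above) =====
theorem generate_w_poly_spec : Claim_equal_generate_w_poly := by
  intro w _ _
  unfold Spec_generate_w_poly generate_w_poly generate_w_poly_alt
  rw [dec_eq]
  have h := outer_eq (pvDecline w 0 true)
    ((((pvDecline w 0 true).length : Int) - 1 - 1)).toNat 1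
    (List.replicate ((pvDecline w 0 true).length - 1)
      (PySem.List.pyGetD (pvDecline w 0 true) 0 0))
    [PySem.List.pyGetD (pvDecline w 0 true) 0 0] (by omega) rfl
  simp only [show ((pvDecline w 0 true).length : Int) - 2
      = ((pvDecline w 0 true).length : Int) - 1 - 1 by ring]
  rw [h.2]
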